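-- pv_equiv track=rewrite | github.com/clueless-skywatcher/nlingua | nlingua/corpora/penn_treebank.py | _split_list_by_val
-- ===== SOURCE A (Python) =====
-- def _split_list_by_val(l, v):
--     lists = []
--     left = 0
--     for i in range(len(l)):
--         if l[i] == v:
--             lists.append(l[left:i + 1])
--             left = i + 1
--     if left < len(l):
--         lists.append(l[left:])
--     return lists
-- ===== SOURCE B (Python) =====
-- def _split_list_by_val(l, v):
--     result = []
--     current = []
--     for x in l:
--         current.append(x)
--         if x == v:
--             result.append(current)
--             current = []
--     if current:
--         result.append(current)
--     return result
-- ===== Notes on version B (the rewrite author's own statement) =====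
-- stated objective: simpler
-- what changed: Replaces the index/range loop with left-pointer bookkeeping and repeated slicing by a single element-wise pass that accumulates a current buffer and flushes it at each occurrence of v.
import Mathlib
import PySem

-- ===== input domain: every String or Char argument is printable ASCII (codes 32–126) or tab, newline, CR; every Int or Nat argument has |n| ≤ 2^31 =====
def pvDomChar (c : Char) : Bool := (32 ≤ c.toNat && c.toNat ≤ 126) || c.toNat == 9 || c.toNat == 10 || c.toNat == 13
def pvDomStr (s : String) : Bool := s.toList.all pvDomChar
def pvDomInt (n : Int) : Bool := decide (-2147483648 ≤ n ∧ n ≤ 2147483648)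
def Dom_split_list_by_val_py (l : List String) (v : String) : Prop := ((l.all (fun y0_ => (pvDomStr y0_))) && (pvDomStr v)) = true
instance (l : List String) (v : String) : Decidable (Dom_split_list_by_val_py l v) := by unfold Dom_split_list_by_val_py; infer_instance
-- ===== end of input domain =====

-- B replaces A's index/range loop with slicing by a single element-wise pass with a current buffer (objective: simpler).


-- ===== PORT A =====
-- body of A's 'for i in range(len(l))' loop; state = (lists, left)
def pvStepA (l : List String) (v : String) (s : List (List String) × Int) (i : Int) :
    List (List String) × Int :=
  if PySem.List.pyGetD l i "" = v then
    (s.1 ++ [PySem.List.slice l (some s.2) (some (i + 1))], i + 1)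
  else s

def split_list_by_val_py (l : List String) (v : String) : List (List String) :=
  let st := (PySem.List.pyRange 0 (l.length : Int) 1).foldl (pvStepA l v) ([], 0)
  if st.2 < (l.length : Int) then st.1 ++ [PySem.List.slice l (some st.2) none] else st.1

-- ===== PORT B =====
-- body of B's 'for x in l' loop; state = (result, current)
def pvStepB (v : String) (s : List (List String) × List String) (x : String) :
    List (List String) × List String :=
  let cur := s.2 ++ [x]
  if x = v then (s.1 ++ [cur], []) else (s.1, cur)

def split_list_by_val_py_alt (l : List String) (v : String) : List (List String) :=
  let st := l.foldl (pvStepB v) ([], [])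
  if st.2 ≠ [] then st.1 ++ [st.2] else st.1

-- ===== PRECONDITION & SPEC =====
def Spec_split_list_by_val_py (l : List String) (v : String) (out : List (List String)) : Prop := out = split_list_by_val_py_alt l v
instance (l : List String) (v : String) (out : List (List String)) : Decidable (Spec_split_list_by_val_py l v out) := by unfold Spec_split_list_by_val_py; infer_instance

-- ===== CLAIM (what is proved, stated in full; the proofs are below) =====
def Claim_equal_split_list_by_val_py : Prop := ∀ (l : List String) (v : String), Dom_split_list_by_val_py l v → Spec_split_list_by_val_py l v (split_list_by_val_py l v)

-- ===== LEMMAS AND PROOFS =====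

-- Loop invariant: A's index loop over the remaining indices, started with left = pre.length
-- and current buffer buf (so the whole list is pre ++ buf ++ rest), produces the same chunks
-- as B's buffer loop over rest, and its final 'left' is the length of the prefix before B's
-- final buffer (which is a suffix of the list).
theorem pv_loop_eq (v : String) (rest : List String) :
    ∀ (pre buf : List String) (acc : List (List String)),
    let l := pre ++ buf ++ rest
    let stB := rest.foldl (pvStepB v) (acc, buf)
    (PySem.List.pyRange ((pre.length + buf.length : Nat) : Int) (l.length : Int) 1).foldl
        (pvStepA l v) (acc, (pre.length : Int))
      = (stB.1, ((pre.length + buf.length + rest.length - stB.2.length : Nat) : Int))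
      ∧ l.drop (pre.length + buf.length + rest.length - stB.2.length) = stB.2 := by
  induction rest with
  | nil =>
    intro pre buf acc
    simp [PySem.List.pyRange]
  | cons x rest ih =>
    intro pre buf acc
    have hcons : PySem.List.pyRange ((pre.length + buf.length : Nat) : Int)
        (((pre ++ buf ++ x :: rest).length : Nat) : Int) 1
        = ((pre.length + buf.length : Nat) : Int) ::
          PySem.List.pyRange (((pre.length + buf.length : Nat) : Int) + 1)
            (((pre ++ buf ++ x :: rest).length : Nat) : Int) 1 := by
      apply PySem.List.pyRange_one_cons
      simp
    simp only [hcons, List.foldl_cons]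
    have hget : PySem.List.pyGetD (pre ++ buf ++ x :: rest)
        ((pre.length + buf.length : Nat) : Int) "" = x := by
      rw [PySem.List.pyGetD_natCast]
      rw [List.append_assoc]
      rw [List.getD_eq_getElem?_getD]
      rw [List.getElem?_append_right (by simp)]
      simp
    by_cases hx : x = v
    · -- flush step: l[left:i+1] = buf ++ [x] is appended, left jumps past it
      have hslice : PySem.List.slice (pre ++ buf ++ x :: rest)
          (some (pre.length : Int)) (some (((pre.length + buf.length : Nat) : Int) + 1))
          = buf ++ [x] := by
        have e : ((pre.length + buf.length : Nat) : Int) + 1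
            = ((pre.length + buf.length + 1 : Nat) : Int) := by push_cast; ring
        rw [e, PySem.List.slice_natCast]
        rw [List.append_assoc, List.drop_left]
        rw [show pre.length + buf.length + 1 - pre.length = buf.length + 1 from by omega]
        rw [show buf ++ x :: rest = (buf ++ [x]) ++ rest from by simp]
        rw [show buf.length + 1 = (buf ++ [x]).length from by simp]
        exact List.take_left
      have hstep : pvStepA (pre ++ buf ++ x :: rest) v (acc, (pre.length : Int))
          ((pre.length + buf.length : Nat) : Int)
          = (acc ++ [buf ++ [x]], ((pre.length + buf.length : Nat) : Int) + 1) := by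
        unfold pvStepA
        rw [hget, if_pos hx]
        dsimp only
        rw [hslice]
      rw [hstep]
      have hB : pvStepB v (acc, buf) x = (acc ++ [buf ++ [x]], []) := by
        simp [pvStepB, hx]
      simp only [hB]
      have := ih (pre ++ buf ++ [x]) [] (acc ++ [buf ++ [x]])
      simp only at this
      have harr : pre ++ buf ++ [x] ++ [] ++ rest = pre ++ buf ++ x :: rest := by simp
      rw [harr] at this
      constructor
      · convert this.1 using 3 <;> simp <;> omega
      · have h2 := this.2
        rw [← h2]
        congr 1
        simp; omega
    · -- keep step: nothing appended, left unchanged, x joins the buffer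
      have hstep : pvStepA (pre ++ buf ++ x :: rest) v (acc, (pre.length : Int))
          ((pre.length + buf.length : Nat) : Int)
          = (acc, (pre.length : Int)) := by
        unfold pvStepA
        rw [hget, if_neg hx]
      rw [hstep]
      have hB : pvStepB v (acc, buf) x = (acc, buf ++ [x]) := by
        simp [pvStepB, hx]
      simp only [hB]
      have := ih pre (buf ++ [x]) acc
      simp only at this
      have harr : pre ++ (buf ++ [x]) ++ rest = pre ++ buf ++ x :: rest := by simp
      rw [harr] at this
      constructor
      · convert this.1 using 3 <;> simp <;> omega
      · have h2 := this.2
        rw [← h2]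
        congr 1
        simp; omega

-- ===== VERDICT (by name: the statement is the Claim_ definition above) =====
theorem split_list_by_val_py_spec : Claim_equal_split_list_by_val_py := by
  intro l v _
  unfold Spec_split_list_by_val_py split_list_by_val_py split_list_by_val_py_alt
  have h := pv_loop_eq v l [] [] []
  simp only [List.nil_append, List.length_nil, Nat.add_zero, Nat.zero_add,
    Nat.cast_zero] at h
  rw [h.1]
  dsimp only
  set stB := l.foldl (pvStepB v) ([], []) with hstB
  have hsz : stB.2.length ≤ l.length := by
    have hd := List.length_drop (l := l) (i := l.length - stB.2.length)
    rw [h.2] at hd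
    omega
  by_cases hb : stB.2 = []
  · simp [hb]
  · have hk : 0 < stB.2.length := List.length_pos_iff.mpr hb
    rw [if_pos (by exact_mod_cast Nat.sub_lt (by omega) hk)]
    rw [if_pos hb]
    rw [PySem.List.slice_from_natCast, h.2]
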